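-- pv_equiv track=rewrite | github.com/sashokpilipok7/python-basics | module2/loops.py | is_second_digit_bigger2
-- ===== SOURCE A (Python) =====
-- def is_second_digit_bigger2(numbers: list[int]) -> list[bool]:
--     result = []
--     for i in range(len(numbers)):
--         current_second_digit = numbers[i] % 10
--         is_greater = True
--
--         for j in (range(i)):
--             temp_second_digit = numbers[j] % 10
--
--             if temp_second_digit > current_second_digit:
--                 is_greater = False
--         result.append(is_greater)
--     return result
-- ===== SOURCE B (Python) =====
-- def is_second_digit_bigger2(numbers: list[int]) -> list[bool]:
--     result = []
--     mx = -1
--     for x in numbers: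
--         d = x % 10
--         result.append(d >= mx)
--         if d > mx:
--             mx = d
--     return result
-- ===== Notes on version B (the rewrite author's own statement) =====
-- stated objective: faster
-- what changed: Replaced the quadratic rescan of all previous elements with a single pass that keeps the running maximum of the last digits.
import Mathlib
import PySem

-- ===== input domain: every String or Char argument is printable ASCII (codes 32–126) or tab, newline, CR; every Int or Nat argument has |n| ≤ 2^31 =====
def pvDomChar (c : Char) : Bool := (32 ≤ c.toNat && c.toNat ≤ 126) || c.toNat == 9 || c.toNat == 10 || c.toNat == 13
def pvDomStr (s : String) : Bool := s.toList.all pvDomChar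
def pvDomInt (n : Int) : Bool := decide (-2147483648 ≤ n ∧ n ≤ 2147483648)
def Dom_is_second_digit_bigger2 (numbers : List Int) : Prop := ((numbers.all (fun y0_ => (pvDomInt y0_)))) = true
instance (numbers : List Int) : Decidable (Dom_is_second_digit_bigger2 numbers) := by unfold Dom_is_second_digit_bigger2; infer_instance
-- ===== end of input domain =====

-- B replaces A's quadratic rescan of all previous last digits by a single pass
-- carrying the running maximum (objective: faster, O(n^2) → O(n)).

-- ===== PORT A =====
-- inner 'for j in range(i)' body of A
def pvInnerStep (numbers : List Int) (current : Int) (g : Bool) (j : Int) : Bool :=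
  let temp := PySem.Int.mod (PySem.List.pyGetD numbers j 0) 10
  if temp > current then false else g

-- outer 'for i in range(len(numbers))' body of A
def pvOuterStep (numbers : List Int) (result : List Bool) (i : Int) : List Bool :=
  let current := PySem.Int.mod (PySem.List.pyGetD numbers i 0) 10
  let is_greater := (PySem.List.pyRange 0 i 1).foldl (pvInnerStep numbers current) true
  result ++ [is_greater]

def is_second_digit_bigger2 (numbers : List Int) : List Bool :=
  (PySem.List.pyRange 0 (numbers.length : Int) 1).foldl (pvOuterStep numbers) []

-- ===== PORT B =====
-- loop body of B: state is (mx, result)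
def pvBStep (st : Int × List Bool) (x : Int) : Int × List Bool :=
  let d := PySem.Int.mod x 10
  (if d > st.1 then d else st.1, st.2 ++ [decide (st.1 ≤ d)])

def is_second_digit_bigger2_alt (numbers : List Int) : List Bool :=
  (numbers.foldl pvBStep (-1, [])).2

-- ===== PRECONDITION & SPEC =====
def Spec_is_second_digit_bigger2 (numbers : List Int) (out : List Bool) : Prop := out = is_second_digit_bigger2_alt numbers
instance (numbers : List Int) (out : List Bool) : Decidable (Spec_is_second_digit_bigger2 numbers out) := by unfold Spec_is_second_digit_bigger2; infer_instance

-- ===== CLAIM (what is proved, stated in full; the proofs are below) =====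
def Claim_equal_is_second_digit_bigger2 : Prop := ∀ (numbers : List Int), Dom_is_second_digit_bigger2 numbers → Spec_is_second_digit_bigger2 numbers (is_second_digit_bigger2 numbers)

-- ===== LEMMAS AND PROOFS =====

-- running maximum of last digits, as B's first state component computes it
def pvM (ns : List Int) : Int :=
  ns.foldl (fun m y => max m (PySem.Int.mod y 10)) (-1)

theorem pvB_fst (ns : List Int) : ∀ (m : Int) (res : List Bool),
    (ns.foldl pvBStep (m, res)).1 = ns.foldl (fun m y => max m (PySem.Int.mod y 10)) m := by
  induction ns with
  | nil => intro m res; rfl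
  | cons x t ih =>
    intro m res
    simp only [List.foldl_cons, pvBStep]
    have hmax : (if PySem.Int.mod x 10 > m then PySem.Int.mod x 10 else m)
        = max m (PySem.Int.mod x 10) := by rw [max_def]; split_ifs <;> omega
    rw [hmax, ih]

theorem pvB_concat (ns : List Int) (x : Int) :
    is_second_digit_bigger2_alt (ns ++ [x])
      = is_second_digit_bigger2_alt ns ++ [decide (pvM ns ≤ PySem.Int.mod x 10)] := by
  simp only [is_second_digit_bigger2_alt, List.foldl_append, List.foldl]
  rw [show ns.foldl pvBStep (-1, []) = ((ns.foldl pvBStep (-1, [])).1, (ns.foldl pvBStep (-1, [])).2) from rfl]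
  simp only [pvBStep, pvB_fst, pvM]
  rfl

theorem pvGetD_append_lt (ns : List Int) (x j : Int) (h0 : 0 ≤ j) (h : j < (ns.length : Int)) :
    PySem.List.pyGetD (ns ++ [x]) j 0 = PySem.List.pyGetD ns j 0 := by
  rw [PySem.List.pyGetD_eq_getElem (ns ++ [x]) 0 h0 (by simp; omega),
      PySem.List.pyGetD_eq_getElem ns 0 h0 h]
  exact List.getElem_append_left (by omega)

theorem pvInner_congr (ns : List Int) (x c : Int) (b : Int) (hb : b ≤ (ns.length : Int)) :
    (PySem.List.pyRange 0 b 1).foldl (pvInnerStep (ns ++ [x]) c) true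
      = (PySem.List.pyRange 0 b 1).foldl (pvInnerStep ns c) true := by
  apply PySem.List.foldl_congr_mem
  intro acc j hj
  rw [PySem.List.mem_pyRange_one] at hj
  simp only [pvInnerStep, pvGetD_append_lt ns x j hj.1 (lt_of_lt_of_le hj.2 hb)]

theorem pvM_concat (ns : List Int) (y : Int) :
    pvM (ns ++ [y]) = max (pvM ns) (PySem.Int.mod y 10) := by
  simp [pvM, List.foldl_append]

theorem pvInner_eq (ns : List Int) (c : Int) (hc : -1 ≤ c) :
    (PySem.List.pyRange 0 (ns.length : Int) 1).foldl (pvInnerStep ns c) true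
      = decide (pvM ns ≤ c) := by
  induction ns using List.reverseRecOn with
  | nil => simp [PySem.List.pyRange, pvM]; omega
  | append_singleton t y ih =>
    have hlen : ((t ++ [y]).length : Int) = (t.length : Int) + 1 := by simp
    rw [hlen, PySem.List.pyRange_one_succ_right (by positivity), List.foldl_append,
        pvInner_congr t y c _ (le_refl _), ih]
    simp only [List.foldl, pvInnerStep]
    rw [PySem.List.pyGetD_eq_getElem (t ++ [y]) 0 (by positivity) (by simp)]
    simp only [Int.toNat_natCast, List.getElem_concat_length]
    rw [pvM_concat]
    by_cases h : PySem.Int.mod y 10 > c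
    · rw [if_pos h]
      rw [PySem.Int.mod_eq_emod_of_pos (by norm_num : (0:Int) < 10)] at h
      simp
      omega
    · rw [if_neg h]
      rw [PySem.Int.mod_eq_emod_of_pos (by norm_num : (0:Int) < 10)] at h
      simp
      omega

theorem pvOuter_congr (ns : List Int) (x : Int) :
    (PySem.List.pyRange 0 (ns.length : Int) 1).foldl (pvOuterStep (ns ++ [x])) []
      = (PySem.List.pyRange 0 (ns.length : Int) 1).foldl (pvOuterStep ns) [] := by
  apply PySem.List.foldl_congr_mem
  intro acc i hi
  rw [PySem.List.mem_pyRange_one] at hi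
  simp only [pvOuterStep, pvGetD_append_lt ns x i hi.1 hi.2,
    pvInner_congr ns x _ i (le_of_lt hi.2)]

theorem pvA_concat (ns : List Int) (x : Int) :
    is_second_digit_bigger2 (ns ++ [x])
      = is_second_digit_bigger2 ns ++ [decide (pvM ns ≤ PySem.Int.mod x 10)] := by
  have hmod : -1 ≤ PySem.Int.mod x 10 := by
    have := PySem.Int.mod_nonneg x (b := 10) (by norm_num); omega
  simp only [is_second_digit_bigger2]
  have hlen : ((ns ++ [x]).length : Int) = (ns.length : Int) + 1 := by simp
  rw [hlen, PySem.List.pyRange_one_succ_right (by positivity), List.foldl_append,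
      pvOuter_congr ns x]
  simp only [List.foldl, pvOuterStep]
  rw [PySem.List.pyGetD_eq_getElem (ns ++ [x]) 0 (by positivity) (by simp)]
  simp only [Int.toNat_natCast, List.getElem_concat_length]
  rw [pvInner_congr ns x _ _ (le_refl _), pvInner_eq ns _ hmod]

theorem pv_main (ns : List Int) : is_second_digit_bigger2 ns = is_second_digit_bigger2_alt ns := by
  induction ns using List.reverseRecOn with
  | nil => rfl
  | append_singleton t x ih => rw [pvA_concat, pvB_concat, ih]

-- ===== VERDICT (by name: the statement is the Claim_ definition above) =====
theorem is_second_digit_bigger2_spec : Claim_equal_is_second_digit_bigger2 := by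
  intro numbers _
  unfold Spec_is_second_digit_bigger2
  exact pv_main numbers
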